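-- pv_equiv track=rewrite | github.com/kmcho2019/VeriLogos-Reasoning | verilogos/augmentator/deletion.py | check_identifier_usage
-- ===== SOURCE A (Python) =====
-- def check_identifier_usage(identifier_count, input_usage, output_usage):
--     input_usage_copy = input_usage.copy()
--     output_usage_copy = output_usage.copy()
--
--     for identifier, count in identifier_count.items():
--         if identifier in input_usage_copy:
--             input_usage_copy[identifier] = max(0, input_usage_copy[identifier] - count)
--
--     for identifier, count in identifier_count.items():
--         if identifier in output_usage_copy:
--             output_usage_copy[identifier] = max(0, output_usage_copy[identifier] - count)
--
--     input_all_zero = all(count == 0 for count in input_usage_copy.values())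
--     output_all_zero = all(count == 0 for count in output_usage_copy.values())
--
--     return input_all_zero or output_all_zero
-- ===== SOURCE B (Python) =====
-- def check_identifier_usage(identifier_count, input_usage, output_usage):
--     def consumed(usage):
--         return all(
--             v <= identifier_count[k] if k in identifier_count else v == 0
--             for k, v in usage.items()
--         )
--     return consumed(input_usage) or consumed(output_usage)
-- ===== Notes on version B (the rewrite author's own statement) =====
-- stated objective: simpler
-- what changed: B drops A's copy-mutate-rescan (copy both usage dicts, subtract counts with a max(0,.) clamp, then test all values zero) and instead checks each usage entry directly in one pass: present keys need v <= identifier_count[k], absent keys need v == 0.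
import Mathlib
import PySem

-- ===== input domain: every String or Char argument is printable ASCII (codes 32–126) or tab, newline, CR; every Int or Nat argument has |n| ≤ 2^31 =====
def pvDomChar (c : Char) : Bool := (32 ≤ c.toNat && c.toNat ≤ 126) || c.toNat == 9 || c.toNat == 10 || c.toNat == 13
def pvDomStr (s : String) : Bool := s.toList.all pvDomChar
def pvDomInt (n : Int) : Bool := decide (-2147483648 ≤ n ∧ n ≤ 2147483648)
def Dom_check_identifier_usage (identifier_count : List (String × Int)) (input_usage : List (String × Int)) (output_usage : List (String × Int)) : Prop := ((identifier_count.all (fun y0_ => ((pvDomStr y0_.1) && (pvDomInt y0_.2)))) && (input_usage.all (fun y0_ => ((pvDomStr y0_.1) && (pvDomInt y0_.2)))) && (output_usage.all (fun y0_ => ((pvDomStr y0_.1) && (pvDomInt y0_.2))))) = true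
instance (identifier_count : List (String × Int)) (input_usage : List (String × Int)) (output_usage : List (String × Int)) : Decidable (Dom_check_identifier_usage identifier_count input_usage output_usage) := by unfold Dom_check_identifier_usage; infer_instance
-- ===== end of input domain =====

-- B replaces A's copy-subtract-then-scan over mutated dict copies with a direct per-entry
-- comparison against identifier_count (no copies, no mutation): objective 'simpler'.

-- ===== PORT A =====
-- dict arguments are materialised from the association lists via PySem.Dict.ofList (Python dict semantics)
def check_identifier_usage (identifier_count : List (String × Int)) (input_usage : List (String × Int)) (output_usage : List (String × Int)) : Bool :=
  let ic := PySem.Dict.ofList identifier_count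
  let input_usage_copy0 := PySem.Dict.ofList input_usage
  let output_usage_copy0 := PySem.Dict.ofList output_usage
  let input_usage_copy := ic.items.foldl
    (fun d p => if d.contains p.1 then d.insert p.1 (max 0 (d.getD p.1 0 - p.2)) else d)
    input_usage_copy0
  let output_usage_copy := ic.items.foldl
    (fun d p => if d.contains p.1 then d.insert p.1 (max 0 (d.getD p.1 0 - p.2)) else d)
    output_usage_copy0
  let input_all_zero := input_usage_copy.values.all (fun c => c == 0)
  let output_all_zero := output_usage_copy.values.all (fun c => c == 0)
  input_all_zero || output_all_zero

-- ===== PORT B =====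
def pvConsumed (ic : PySem.Dict String Int) (usage : PySem.Dict String Int) : Bool :=
  usage.items.all (fun p =>
    match ic.get? p.1 with
    | some c => decide (p.2 ≤ c)
    | none => decide (p.2 = 0))

def check_identifier_usage_alt (identifier_count : List (String × Int)) (input_usage : List (String × Int)) (output_usage : List (String × Int)) : Bool :=
  let ic := PySem.Dict.ofList identifier_count
  pvConsumed ic (PySem.Dict.ofList input_usage) || pvConsumed ic (PySem.Dict.ofList output_usage)

-- ===== PRECONDITION & SPEC =====
def Spec_check_identifier_usage (identifier_count : List (String × Int)) (input_usage : List (String × Int)) (output_usage : List (String × Int)) (out : Bool) : Prop := out = check_identifier_usage_alt identifier_count input_usage output_usage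
instance (identifier_count : List (String × Int)) (input_usage : List (String × Int)) (output_usage : List (String × Int)) (out : Bool) : Decidable (Spec_check_identifier_usage identifier_count input_usage output_usage out) := by unfold Spec_check_identifier_usage; infer_instance

-- ===== CLAIM (what is proved, stated in full; the proofs are below) =====
def Claim_equal_check_identifier_usage : Prop := ∀ (identifier_count : List (String × Int)) (input_usage : List (String × Int)) (output_usage : List (String × Int)), Dom_check_identifier_usage identifier_count input_usage output_usage → Spec_check_identifier_usage identifier_count input_usage output_usage (check_identifier_usage identifier_count input_usage output_usage)

-- ===== LEMMAS AND PROOFS =====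

-- A's subtraction step on one identifier_count item
def pvStep (d : PySem.Dict String Int) (p : String × Int) : PySem.Dict String Int :=
  if d.contains p.1 then d.insert p.1 (max 0 (d.getD p.1 0 - p.2)) else d

-- first-match lookup on a raw pair list
def pvLk : List (String × Int) → String → Option Int
  | [], _ => none
  | p :: t, k => if p.1 = k then some p.2 else pvLk t k

theorem pvGet?_eq_lk (l : List (String × Int)) (k : String) :
    (PySem.Dict.mk l).get? k = pvLk l k := by
  induction l with
  | nil => simp [PySem.Dict.get?, pvLk]
  | cons p t ih =>
    cases p with
    | mk a b =>
      rw [PySem.Dict.get?_mk_cons]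
      simp only [pvLk, beq_iff_eq]
      split <;> simp_all

theorem pvStep_keys (d : PySem.Dict String Int) (p : String × Int) :
    (pvStep d p).keys = d.keys := by
  unfold pvStep
  split
  · exact PySem.Dict.keys_insert_of_contains d _ (by assumption)
  · rfl

theorem pvFoldl_keys (l : List (String × Int)) (d : PySem.Dict String Int) :
    (l.foldl pvStep d).keys = d.keys := by
  induction l generalizing d with
  | nil => rfl
  | cons p t ih => simp [List.foldl_cons, ih, pvStep_keys]

theorem pvStep_getD_ne (d : PySem.Dict String Int) (p : String × Int) (k : String) (h : k ≠ p.1) :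
    (pvStep d p).getD k 0 = d.getD k 0 := by
  unfold pvStep
  split
  · exact PySem.Dict.getD_insert_of_ne _ _ _ h
  · rfl

theorem pvFoldl_getD_not_mem (l : List (String × Int)) (d : PySem.Dict String Int) (k : String)
    (h : k ∉ l.map Prod.fst) :
    (l.foldl pvStep d).getD k 0 = d.getD k 0 := by
  induction l generalizing d with
  | nil => rfl
  | cons p t ih =>
    simp only [List.map_cons, List.mem_cons] at h
    push Not at h
    rw [List.foldl_cons, ih _ h.2, pvStep_getD_ne _ _ _ h.1]

theorem pvStep_contains (d : PySem.Dict String Int) (p : String × Int) (k : String) :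
    (pvStep d p).contains k = d.contains k := by
  rw [PySem.Dict.contains_eq_decide_mem_keys, PySem.Dict.contains_eq_decide_mem_keys, pvStep_keys]

theorem pvFoldl_getD (l : List (String × Int)) (d : PySem.Dict String Int) (k : String)
    (hnd : (l.map Prod.fst).Nodup) :
    (l.foldl pvStep d).getD k 0 =
      match pvLk l k with
      | some c => if d.contains k then max 0 (d.getD k 0 - c) else d.getD k 0
      | none => d.getD k 0 := by
  induction l generalizing d with
  | nil => rfl
  | cons p t ih =>
    simp only [List.map_cons, List.nodup_cons] at hnd
    by_cases hk : k = p.1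
    · subst hk
      rw [List.foldl_cons, pvFoldl_getD_not_mem t _ p.1 hnd.1]
      unfold pvStep
      split
      · rename_i hc
        rw [PySem.Dict.getD_insert_self]
        simp [pvLk]
      · rename_i hc
        simp [pvLk]
    · rw [List.foldl_cons, ih _ hnd.2]
      have hg := pvStep_getD_ne d p k hk
      have hc := pvStep_contains d p k
      rw [hg, hc]
      simp only [pvLk]
      rw [if_neg (show ¬ p.1 = k from fun h => hk h.symm)]

-- per-usage-dict core: A's subtract-then-all-zero scan equals B's direct comparison
theorem pvCore (ic u : PySem.Dict String Int) (hic : ic.keys.Nodup) (hu : u.keys.Nodup) :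
    ((ic.items.foldl pvStep u).values.all (fun c => c == 0)) = pvConsumed ic u := by
  have hkeys : (ic.items.map Prod.fst).Nodup := hic
  have hfk : (ic.items.foldl pvStep u).keys = u.keys := pvFoldl_keys _ _
  rw [PySem.Dict.values_eq_map_keys _ (hfk ▸ hu) 0, hfk]
  unfold pvConsumed
  rw [PySem.Dict.items_eq_map_keys u hu 0]
  rw [List.all_map, List.all_map]
  rw [Bool.eq_iff_iff, List.all_eq_true, List.all_eq_true]
  constructor <;> intro h k hk <;> have hh := h k hk <;>
  · have hcont : u.contains k = true := by
      rw [PySem.Dict.contains_eq_decide_mem_keys]; simpa using hk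
    have hget : ic.get? k = pvLk ic.items k := by
      cases ic with
      | mk l => exact pvGet?_eq_lk l k
    rw [Function.comp_apply, pvFoldl_getD _ _ _ hkeys] at *
    simp only [hget] at *
    cases hlk : pvLk ic.items k <;> simp only [hlk, hcont, if_true] at hh ⊢ <;>
      simp at hh ⊢ <;> omega

-- ===== VERDICT (by name: the statement is the Claim_ definition above) =====
theorem check_identifier_usage_spec : Claim_equal_check_identifier_usage := by
  intro ic iu ou _
  unfold Spec_check_identifier_usage check_identifier_usage check_identifier_usage_alt
  have hstep : (fun (d : PySem.Dict String Int) (p : String × Int) =>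
      if d.contains p.1 then d.insert p.1 (max 0 (d.getD p.1 0 - p.2)) else d) = pvStep := rfl
  simp only [hstep]
  rw [pvCore _ _ (PySem.Dict.nodup_keys_ofList ic) (PySem.Dict.nodup_keys_ofList iu),
      pvCore _ _ (PySem.Dict.nodup_keys_ofList ic) (PySem.Dict.nodup_keys_ofList ou)]
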